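-- pv_equiv track=rewrite | github.com/sachaheroux/interface_backend | johnson.py | johnson_schedule
-- ===== SOURCE A (Python) =====
-- def johnson_schedule(tasks):
--     tasks = sorted([(min(time), i, time) for i, time in enumerate(tasks)])
--     schedule = [0] * len(tasks)
--     start, end = 0, len(tasks) - 1
--
--     for _, original_i, times in tasks:
--         if times[0] <= times[1]:
--             schedule[start] = original_i
--             start += 1
--         else:
--             schedule[end] = original_i
--             end -= 1
--
--     return schedule
-- ===== SOURCE B (Python) =====
-- def johnson_schedule(tasks):
--     group1 = sorted((min(t), i) for i, t in enumerate(tasks) if t[0] <= t[1])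
--     group2 = sorted((min(t), i) for i, t in enumerate(tasks) if t[0] > t[1])
--     return [i for _, i in group1] + [i for _, i in reversed(group2)]
-- ===== Notes on version B (the rewrite author's own statement) =====
-- stated objective: simpler
-- what changed: A sorts all tasks once and fills a pre-allocated buffer with moving front/back pointers; B drops the buffer and pointers entirely, sorting the two Johnson groups independently and concatenating group1 ascending with group2 reversed.
import Mathlib
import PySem

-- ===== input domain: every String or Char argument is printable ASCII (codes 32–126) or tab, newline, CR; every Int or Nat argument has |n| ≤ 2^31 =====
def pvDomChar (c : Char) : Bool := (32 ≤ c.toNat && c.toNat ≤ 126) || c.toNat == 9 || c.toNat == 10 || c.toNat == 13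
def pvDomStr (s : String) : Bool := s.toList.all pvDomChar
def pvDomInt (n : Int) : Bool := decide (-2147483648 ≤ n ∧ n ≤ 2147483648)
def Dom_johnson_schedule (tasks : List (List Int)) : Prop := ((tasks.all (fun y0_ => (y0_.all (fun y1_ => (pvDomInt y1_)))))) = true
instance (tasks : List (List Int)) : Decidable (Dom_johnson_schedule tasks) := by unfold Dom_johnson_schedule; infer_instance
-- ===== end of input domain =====

-- B replaces A's pre-allocated buffer with two front/back pointers by two independent
-- sorts of the two Johnson groups (ascending, the back group then reversed); objective: simpler.

-- t[0] <= t[1]  (Python raises IndexError on tasks shorter than 2; those inputs are outside Pre_,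
-- the .getD 0 default is never the value Python compares there)
def taskCond (t : List Int) : Bool := decide ((PySem.List.pyGet? t 0).getD 0 ≤ (PySem.List.pyGet? t 1).getD 0)

-- ===== PORT A =====
-- (min(time), i, time); Python sorts these tuples lexicographically, and the third component
-- is never consulted because the indices i are pairwise distinct, so the sort key is exactly
-- toLex (min, i).  min of an empty task raises ValueError in Python; outside Pre_, .getD 0 never read there.
def tripleOfA (p : Int × List Int) : Int × Int × List Int :=
  ((PySem.List.min? p.2 (fun x => x)).getD 0, p.1, p.2)

-- the for-loop over the sorted triples, filling schedule[start]/schedule[end] in place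
def johnsonFill : List (Int × Int × List Int) → List Int → Nat → Int → List Int
  | [], sched, _, _ => sched
  | t :: rest, sched, s, e =>
    if taskCond t.2.2 then
      johnsonFill rest (sched.set s t.2.1) (s + 1) e
    else
      -- e is nonnegative at every use (the back pointer never passes the front pointer)
      johnsonFill rest (sched.set e.toNat t.2.1) s (e - 1)

def johnson_schedule (tasks : List (List Int)) : List Int :=
  johnsonFill
    (PySem.List.sorted ((PySem.List.enumerate tasks 0).map tripleOfA) (fun t => toLex (t.1, t.2.1)))
    (List.replicate tasks.length 0) 0 ((tasks.length : Int) - 1)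

-- ===== PORT B =====
-- (min(t), i) key pair, as Source B builds it
def pairOfB (p : Int × List Int) : Int × Int :=
  ((PySem.List.min? p.2 (fun x => x)).getD 0, p.1)

def johnson_schedule_alt (tasks : List (List Int)) : List Int :=
  (PySem.List.sorted (((PySem.List.enumerate tasks 0).filter (fun p => taskCond p.2)).map pairOfB)
      (fun q => toLex q)).map (fun q => q.2) ++
  ((PySem.List.sorted (((PySem.List.enumerate tasks 0).filter (fun p => !taskCond p.2)).map pairOfB)
      (fun q => toLex q)).reverse.map (fun q => q.2))

-- ===== PRECONDITION & SPEC =====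
-- Pre_ excludes exactly the inputs where Python A raises: a task list with fewer than two
-- machine times (times[1] -> IndexError; min of an empty task -> ValueError).
def Pre_johnson_schedule (tasks : List (List Int)) : Prop := ∀ t ∈ tasks, 2 ≤ t.length
instance (tasks : List (List Int)) : Decidable (Pre_johnson_schedule tasks) := by
  unfold Pre_johnson_schedule; infer_instance

def pvWitness_johnson_schedule : List (List Int) := [[1, 2], [3, 1], [2, 2]]

def Spec_johnson_schedule (tasks : List (List Int)) (out : List Int) : Prop := out = johnson_schedule_alt tasks
instance (tasks : List (List Int)) (out : List Int) : Decidable (Spec_johnson_schedule tasks out) := by unfold Spec_johnson_schedule; infer_instance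

-- ===== CLAIM (what is proved, stated in full; the proofs are below) =====
def Claim_equal_johnson_schedule : Prop := ∀ (tasks : List (List Int)), Dom_johnson_schedule tasks → Pre_johnson_schedule tasks → Spec_johnson_schedule tasks (johnson_schedule tasks)

-- ===== LEMMAS AND PROOFS =====

-- the indices A writes into the front region, in order, and those of the back region
def frontL (L : List (Int × Int × List Int)) : List Int :=
  (L.filter (fun t => taskCond t.2.2)).map (fun t => t.2.1)
def backL (L : List (Int × Int × List Int)) : List Int :=
  (L.filter (fun t => !taskCond t.2.2)).map (fun t => t.2.1)

-- A's two-pointer fill writes frontL left to right from position s and backL right to left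
-- from position s + |L| - 1, leaving the rest of the buffer untouched
theorem johnsonFill_spec (L : List (Int × Int × List Int)) :
    ∀ (sched : List Int) (s : Nat), s + L.length ≤ sched.length →
    johnsonFill L sched s ((s : Int) + L.length - 1) =
      sched.take s ++ (frontL L ++ (backL L).reverse) ++ sched.drop (s + L.length) := by
  induction L with
  | nil => intro sched s h; simp [johnsonFill, frontL, backL]
  | cons t rest ih =>
    intro sched s h
    simp only [List.length_cons] at h
    by_cases hc : taskCond t.2.2
    · have hs : s < sched.length := by omega
      have harg : (s : Int) + (t :: rest).length - 1 = ((s + 1 : Nat) : Int) + rest.length - 1 := by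
        simp only [List.length_cons]; push_cast; ring
      have hlen : s + 1 + rest.length ≤ (sched.set s t.2.1).length := by simp; omega
      rw [show johnsonFill (t :: rest) sched s ((s : Int) + (t :: rest).length - 1) =
            johnsonFill rest (sched.set s t.2.1) (s + 1) ((s : Int) + (t :: rest).length - 1) by
          simp [johnsonFill, hc],
        harg, ih (sched.set s t.2.1) (s + 1) hlen]
      have htake : (sched.set s t.2.1).take (s + 1) = sched.take s ++ [t.2.1] := by
        rw [List.set_eq_take_append_cons_drop, if_pos hs]
        simp [List.take_append, List.take_take, List.length_take, Nat.min_eq_left hs.le]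
      have hdrop : (sched.set s t.2.1).drop (s + 1 + rest.length) =
          sched.drop (s + (t :: rest).length) := by
        rw [List.drop_set, if_pos (by omega)]
        simp only [List.length_cons]; congr 1; omega
      rw [htake, hdrop, show frontL (t :: rest) = t.2.1 :: frontL rest by simp [frontL, hc],
          show backL (t :: rest) = backL rest by simp [backL, hc]]
      simp [List.append_assoc]
    · have hs : s + rest.length < sched.length := by omega
      have he : ((s : Int) + (t :: rest).length - 1).toNat = s + rest.length := by
        simp only [List.length_cons]; omega
      have harg : (s : Int) + (t :: rest).length - 1 - 1 = (s : Int) + rest.length - 1 := by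
        simp only [List.length_cons]; push_cast; ring
      have hlen : s + rest.length ≤ (sched.set (s + rest.length) t.2.1).length := by simp; omega
      rw [show johnsonFill (t :: rest) sched s ((s : Int) + (t :: rest).length - 1) =
            johnsonFill rest (sched.set (((s : Int) + (t :: rest).length - 1).toNat) t.2.1) s
              ((s : Int) + (t :: rest).length - 1 - 1) by simp [johnsonFill, hc],
        he, harg, ih (sched.set (s + rest.length) t.2.1) s hlen]
      have htake : (sched.set (s + rest.length) t.2.1).take s = sched.take s := by
        rw [List.take_set, List.set_eq_of_length_le (by simp only [List.length_take]; omega)]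
      have hdrop : (sched.set (s + rest.length) t.2.1).drop (s + rest.length) =
          t.2.1 :: sched.drop (s + rest.length + 1) := by
        rw [List.set_eq_take_append_cons_drop, if_pos hs]
        simp [List.length_take, Nat.min_eq_left hs.le]
      rw [htake, hdrop, show frontL (t :: rest) = frontL rest by simp [frontL, hc],
          show backL (t :: rest) = t.2.1 :: backL rest by simp [backL, hc]]
      simp [List.append_assoc, List.length_cons, Nat.add_assoc]

-- any filter of A's sorted triple list is itself pairwise strictly key-increasing
theorem sortedT_pairwise_lt (tasks : List (List Int)) (p : Int × Int × List Int → Bool) :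
    ((PySem.List.sorted ((PySem.List.enumerate tasks 0).map tripleOfA)
        (fun t => toLex (t.1, t.2.1))).filter p).Pairwise
      (fun a b => toLex (a.1, a.2.1) < toLex (b.1, b.2.1)) := by
  have hle := PySem.List.sorted_pairwise ((PySem.List.enumerate tasks 0).map tripleOfA)
      (fun t => toLex (t.1, t.2.1))
  have hne : ((PySem.List.enumerate tasks 0).map tripleOfA).Pairwise
      (fun a b => a.2.1 ≠ b.2.1) := by
    rw [List.pairwise_map]
    refine (PySem.List.pairwise_lt_enumerate tasks 0).imp ?_
    intro a b h
    simp only [tripleOfA]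
    omega
  have hne' := (List.Perm.pairwise_iff (fun h => Ne.symm h)
      (PySem.List.sorted_perm ((PySem.List.enumerate tasks 0).map tripleOfA)
        (fun t => toLex (t.1, t.2.1)) false)).mpr hne
  refine ((hle.and hne').imp ?_).filter p
  rintro a b ⟨h1, h2⟩
  refine lt_of_le_of_ne h1 (fun hk => h2 ?_)
  have := congrArg (fun q => (ofLex q).2) hk
  simpa using this

-- B's sorted group equals the corresponding filter of A's sorted list, projected to key pairs
theorem group_eq (tasks : List (List Int)) (c : Int × List Int → Bool)
    (c' : Int × Int × List Int → Bool) (hcc : ∀ p, c' (tripleOfA p) = c p) :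
    PySem.List.sorted (((PySem.List.enumerate tasks 0).filter c).map pairOfB)
        (fun q => toLex q) =
      ((PySem.List.sorted ((PySem.List.enumerate tasks 0).map tripleOfA)
          (fun t => toLex (t.1, t.2.1))).filter c').map
        (fun t => (t.1, t.2.1)) := by
  have hfm : ((PySem.List.enumerate tasks 0).map tripleOfA).filter c' =
      ((PySem.List.enumerate tasks 0).filter c).map tripleOfA := by
    rw [List.filter_map]
    congr 1
    exact List.filter_congr (fun x _ => hcc x)
  apply PySem.List.sorted_eq_of_perm_of_pairwise_lt
  · have hperm : ((PySem.List.sorted ((PySem.List.enumerate tasks 0).map tripleOfA)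
        (fun t => toLex (t.1, t.2.1))).filter c').Perm
        (((PySem.List.enumerate tasks 0).map tripleOfA).filter c') :=
      (PySem.List.sorted_perm _ _ _).filter _
    have := hperm.map (fun t : Int × Int × List Int => (t.1, t.2.1))
    rw [hfm, List.map_map] at this
    exact this
  · rw [List.pairwise_map]
    exact sortedT_pairwise_lt tasks _

-- ===== VERDICT (by name: the statement is the Claim_ definition above) =====
theorem johnson_schedule_spec : Claim_equal_johnson_schedule := by
  intro tasks _ _
  unfold Spec_johnson_schedule johnson_schedule johnson_schedule_alt
  have hlen : (PySem.List.sorted ((PySem.List.enumerate tasks 0).map tripleOfA)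
      (fun t => toLex (t.1, t.2.1))).length = tasks.length := by
    rw [(PySem.List.sorted_perm _ _ _).length_eq]
    simp
  have harg : ((tasks.length : Int)) - 1 = ((0 : Nat) : Int) +
      (PySem.List.sorted ((PySem.List.enumerate tasks 0).map tripleOfA)
        (fun t => toLex (t.1, t.2.1))).length - 1 := by
    rw [hlen]; push_cast; ring
  rw [harg, johnsonFill_spec _ _ 0 (by simp [hlen]),
    group_eq tasks (fun p => taskCond p.2) (fun t => taskCond t.2.2) (fun p => rfl),
    group_eq tasks (fun p => !taskCond p.2) (fun t => !taskCond t.2.2) (fun p => rfl)]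
  simp [frontL, backL, hlen, List.map_map, Function.comp_def]
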